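-- pv_equiv track=rewrite | github.com/Shaner1niner/sentiment-dash | scripts/build_seta_narrative_context.py | index_ranked_rows
-- ===== SOURCE A (Python) =====
-- from typing import Any, Dict, Iterable, List, Optional, Tuple
--
-- def term_key(value: Any) -> str:
--     return str(value or "").strip().upper()
--
-- def index_ranked_rows(rows: List[Dict[str, Any]], top_n: int) -> Dict[str, List[Dict[str, Any]]]:
--     by_term: Dict[str, List[Dict[str, Any]]] = {}
--     for row in rows:
--         term = term_key(row.get("term"))
--         if not term:
--             continue
--         by_term.setdefault(term, []).append(row)
--     for term, term_rows in by_term.items():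
--         term_rows.sort(key=lambda r: int(r.get("rank") or 999999))
--         by_term[term] = term_rows[:top_n]
--     return by_term
-- ===== SOURCE B (Python) =====
-- from typing import Any, Dict, List
--
--
-- def term_key(value: Any) -> str:
--     return str(value or "").strip().upper()
--
--
-- def index_ranked_rows(rows: List[Dict[str, Any]], top_n: int) -> Dict[str, List[Dict[str, Any]]]:
--     # One global stable sort instead of a per-bucket sort; no mutable bucket dict.
--     valid = [(t, r) for (t, r) in ((term_key(r.get("term")), r) for r in rows) if t]
--     ranked = sorted(valid, key=lambda p: int(p[1].get("rank") or 999999))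
--     order = list(dict.fromkeys(t for (t, _) in valid))
--     return {t: [r for (tt, r) in ranked if tt == t][:top_n] for t in order}
-- ===== Notes on version B (the rewrite author's own statement) =====
-- stated objective: alternative
-- what changed: B replaces A's mutable dict of buckets with per-bucket sorts by a flat pipeline: filter valid (term,row) pairs, one global stable sort by rank, dedup the terms for key order, and build each bucket by filtering the sorted list and slicing [:top_n].
import Mathlib
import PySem

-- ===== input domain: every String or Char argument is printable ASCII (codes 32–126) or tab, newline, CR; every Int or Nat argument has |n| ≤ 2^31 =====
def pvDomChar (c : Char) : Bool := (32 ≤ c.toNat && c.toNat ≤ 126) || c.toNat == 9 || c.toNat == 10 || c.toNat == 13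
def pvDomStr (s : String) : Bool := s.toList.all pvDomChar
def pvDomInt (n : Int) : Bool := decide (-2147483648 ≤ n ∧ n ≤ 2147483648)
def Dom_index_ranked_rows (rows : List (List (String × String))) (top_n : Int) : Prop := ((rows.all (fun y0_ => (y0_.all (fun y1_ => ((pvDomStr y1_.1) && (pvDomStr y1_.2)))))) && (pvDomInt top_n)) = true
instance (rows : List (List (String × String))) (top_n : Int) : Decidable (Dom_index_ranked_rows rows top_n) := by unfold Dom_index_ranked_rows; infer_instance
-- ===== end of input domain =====

-- B replaces A's bucket-then-sort-each-bucket dict pipeline by one global stable sort plus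
-- per-term filtering over the sorted list (objective: alternative decomposition, same result).

-- ===== PORT A =====
-- row.get(k): first-match lookup in the row's association list
def pvRowGet (row : List (String × String)) (k : String) : Option String :=
  PySem.Dict.get? (PySem.Dict.mk row) k

-- term_key(value) = str(value or "").strip().upper()
def pvTermKey (v : Option String) : String :=
  PySem.Str.upper (PySem.Str.strip (v.getD ""))

-- int(r.get("rank") or 999999); the '.getD 0' default is unreachable under Pre_ (ofStr? = some there)
def pvRank (row : List (String × String)) : Int :=
  match pvRowGet row "rank" with
  | none => 999999
  | some s => if s = "" then 999999 else (PySem.Int.ofStr? s).getD 0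

def index_ranked_rows (rows : List (List (String × String))) (top_n : Int) : List (String × List (List (String × String))) :=
  -- first loop: bucket rows by term, skipping empty terms
  let byTerm : PySem.Dict String (List (List (String × String))) :=
    rows.foldl (fun d row =>
      let term := pvTermKey (pvRowGet row "term")
      if term = "" then d else d.modify term [] (· ++ [row])) PySem.Dict.empty
  -- second loop: for term, term_rows in by_term.items(): sort by rank, keep [:top_n]
  let final :=
    byTerm.items.foldl (fun d p =>
      d.insert p.1 (PySem.List.slice (PySem.List.sorted p.2 pvRank false) none (some top_n))) byTerm
  final.items

-- ===== PORT B =====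
def index_ranked_rows_alt (rows : List (List (String × String))) (top_n : Int) : List (String × List (List (String × String))) :=
  let valid := (rows.map (fun r => (pvTermKey (pvRowGet r "term"), r))).filter (fun p => p.1 != "")
  let ranked := PySem.List.sorted valid (fun p => pvRank p.2) false
  let order := PySem.List.dedup (valid.map (·.1))
  order.map (fun t =>
    (t, PySem.List.slice ((ranked.filter (fun p => p.1 == t)).map (·.2)) none (some top_n)))

-- ===== PRECONDITION & SPEC =====
-- Pre_ excludes exactly the inputs where Python A raises ValueError: a row with a non-empty
-- term whose "rank" value is a non-empty string that int() cannot parse.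
def Pre_index_ranked_rows (rows : List (List (String × String))) (_top_n : Int) : Prop :=
  (rows.all (fun row =>
    (pvTermKey (pvRowGet row "term") == "") ||
      (match pvRowGet row "rank" with
       | none => true
       | some s => (s == "") || (PySem.Int.ofStr? s).isSome))) = true

instance (rows : List (List (String × String))) (top_n : Int) : Decidable (Pre_index_ranked_rows rows top_n) := by
  unfold Pre_index_ranked_rows; infer_instance

def pvWitness_index_ranked_rows : (List (List (String × String))) × Int :=
  ([[("term", "a"), ("rank", "2")], [("term", "a"), ("rank", "1")], [("term", "b")]], 1)

def Spec_index_ranked_rows (rows : List (List (String × String))) (top_n : Int) (out : List (String × List (List (String × String)))) : Prop := out = index_ranked_rows_alt rows top_n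
instance (rows : List (List (String × String))) (top_n : Int) (out : List (String × List (List (String × String)))) : Decidable (Spec_index_ranked_rows rows top_n out) := by unfold Spec_index_ranked_rows; infer_instance

-- ===== CLAIM (what is proved, stated in full; the proofs are below) =====
def Claim_equal_index_ranked_rows : Prop := ∀ (rows : List (List (String × String))) (top_n : Int), Dom_index_ranked_rows rows top_n → Pre_index_ranked_rows rows top_n → Spec_index_ranked_rows rows top_n (index_ranked_rows rows top_n)

-- ===== LEMMAS AND PROOFS =====

-- A's skip-empty bucket loop over rows is the bucket loop over the (term, row) pairs B calls `valid`.
theorem pvFoldA (rows : List (List (String × String))) :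
    ∀ (d : PySem.Dict String (List (List (String × String)))),
      rows.foldl (fun d row =>
        let term := pvTermKey (pvRowGet row "term")
        if term = "" then d else d.modify term [] (· ++ [row])) d
      = ((rows.map (fun r => (pvTermKey (pvRowGet r "term"), r))).filter (fun p => p.1 != "")).foldl
          (fun d p => d.modify p.1 [] (· ++ [p.2])) d := by
  induction rows with
  | nil => intro d; rfl
  | cons r rest ih =>
    intro d
    by_cases h : pvTermKey (pvRowGet r "term") = "" <;>
      simp [h, ih]

-- insertBy puts x in front when it sorts before everything in the list
theorem pvInsertFront {α : Type} (before : α → α → Bool) (x : α) (ws : List α)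
    (h : ∀ w ∈ ws, before x w = true) : PySem.List.insertBy before x ws = x :: ws := by
  cases ws with
  | nil => rfl
  | cons y t => simp [PySem.List.insertBy, h y (by simp)]

-- one insertion step: filtering a term out of an insertBy into a rank-sorted list
theorem pvStepIns (q : String × List (String × String)) (t : String) :
    ∀ (acc : List (String × List (String × String))),
      acc.Pairwise (fun a b => pvRank a.2 ≤ pvRank b.2) →
      ((PySem.List.insertBy (fun a b => decide (pvRank a.2 < pvRank b.2)) q acc).filter
          (fun p => p.1 == t)).map (·.2) =
        if q.1 == t then
          PySem.List.insertBy (fun a b => decide (pvRank a < pvRank b)) q.2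
            ((acc.filter (fun p => p.1 == t)).map (·.2))
        else (acc.filter (fun p => p.1 == t)).map (·.2) := by
  intro acc
  induction acc with
  | nil =>
    intro _
    by_cases hq : q.1 = t <;> simp [PySem.List.insertBy, hq]
  | cons y rest ih =>
    intro hp
    rw [List.pairwise_cons] at hp
    obtain ⟨hy, hrest⟩ := hp
    by_cases hlt : pvRank q.2 < pvRank y.2
    · -- q is inserted in front of y
      rw [show PySem.List.insertBy (fun a b => decide (pvRank a.2 < pvRank b.2)) q (y :: rest)
            = q :: y :: rest by simp [PySem.List.insertBy, hlt]]
      by_cases hq : q.1 = t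
      · by_cases hyt : y.1 = t
        · simp [hq, hyt, PySem.List.insertBy, hlt]
        · have hfront : PySem.List.insertBy (fun a b => decide (pvRank a < pvRank b)) q.2
              ((rest.filter (fun p => p.1 == t)).map (·.2))
              = q.2 :: (rest.filter (fun p => p.1 == t)).map (·.2) := by
            apply pvInsertFront
            intro w hw
            simp only [List.mem_map, List.mem_filter] at hw
            obtain ⟨p, ⟨hpm, _⟩, rfl⟩ := hw
            exact decide_eq_true (lt_of_lt_of_le hlt (hy p hpm))
          simp [hq, hyt, hfront]
      · simp [hq]
    · -- q goes further down: insertBy (y :: rest) = y :: insertBy rest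
      rw [show PySem.List.insertBy (fun a b => decide (pvRank a.2 < pvRank b.2)) q (y :: rest)
            = y :: PySem.List.insertBy (fun a b => decide (pvRank a.2 < pvRank b.2)) q rest by
          simp [PySem.List.insertBy, hlt]]
      by_cases hq : q.1 = t
      · by_cases hyt : y.1 = t
        · simp [hq, hyt, ih hrest, PySem.List.insertBy, hlt]
        · simp [hq, hyt, ih hrest]
      · by_cases hyt : y.1 = t <;> simp [hq, hyt, ih hrest]

-- sorted(M ++ [q]) is one insertBy into sorted(M)
theorem pvSortedAppend {α κ : Type} [LinearOrder κ] (M : List α) (q : α) (key : α → κ) :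
    PySem.List.sorted (M ++ [q]) key false
      = PySem.List.insertBy (fun a b => decide (key a < key b)) q (PySem.List.sorted M key false) := by
  rw [PySem.List.sorted_eq_foldl_insertBy, PySem.List.sorted_eq_foldl_insertBy, List.foldl_append]
  rfl

-- the heart of the equivalence: filtering one term out of the globally rank-sorted pair list
-- is the rank-sort of that term's bucket (stability preserved by filtering)
theorem pvMain (t : String) (L : List (String × List (String × String))) :
    ((PySem.List.sorted L (fun p => pvRank p.2) false).filter (fun p => p.1 == t)).map (·.2)
      = PySem.List.sorted ((L.filter (fun p => p.1 == t)).map (·.2)) pvRank false := by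
  induction L using List.reverseRecOn with
  | nil => rfl
  | append_singleton M q ih =>
    rw [pvSortedAppend, pvStepIns q t _ (PySem.List.sorted_pairwise M (fun p => pvRank p.2)),
      List.filter_append, List.map_append]
    by_cases hq : q.1 = t
    · simp only [hq, beq_self_eq_true, if_true, List.filter_cons, List.filter_nil,
        List.map_cons, List.map_nil]
      rw [pvSortedAppend, ih]
    · simp [hq, ih]

-- getD after a fold of inserts over pairs with distinct keys: the matching pair wins
theorem pvGetDFoldIns (g : String × List (List (String × String)) → List (List (String × String)))
    (l : List (String × List (List (String × String))))
    (hnd : (l.map (·.1)).Nodup)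
    (d : PySem.Dict String (List (List (String × String)))) (k : String) :
    (l.foldl (fun d p => d.insert p.1 (g p)) d).getD k []
      = match l.find? (fun p => p.1 == k) with
        | some p => g p
        | none => d.getD k [] := by
  induction l using List.reverseRecOn with
  | nil => rfl
  | append_singleton m p ih =>
    rw [List.foldl_append]
    simp only [List.foldl_cons, List.foldl_nil]
    rw [PySem.Dict.getD_insert, List.find?_append]
    have hndm : (m.map (·.1)).Nodup := by
      rw [List.map_append] at hnd
      exact (List.nodup_append.mp hnd).1
    by_cases hk : k = p.1
    · subst hk
      have hnm : p.1 ∉ m.map (·.1) := by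
        rw [List.map_append] at hnd
        intro hmem
        exact (List.nodup_append.mp hnd).2.2 p.1 hmem p.1 (by simp) rfl
      have hfind : m.find? (fun q => q.1 == p.1) = none := by
        rw [List.find?_eq_none]
        intro x hx
        intro hxk
        have hxk' : x.1 = p.1 := eq_of_beq hxk
        have hx1 : x.1 ∈ m.map (fun y => y.1) := List.mem_map.mpr ⟨x, hx, rfl⟩
        rw [hxk'] at hx1
        exact hnm hx1
      simp [hfind]
    · have hbe : (p.1 == k) = false := beq_eq_false_iff_ne.mpr (fun h => hk h.symm)
      have hfindp : List.find? (fun q => q.1 == k) [p] = none := by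
        simp [hbe]
      rw [hfindp, Option.or_none, ih hndm]
      simp [hk]

-- find? over keys decorated with a value function: the key itself is found first
theorem pvFindMapKeys (f : String → List (List (String × String))) (ks : List String) (t : String)
    (h : t ∈ ks) :
    (ks.map (fun k => (k, f k))).find? (fun p => p.1 == t) = some (t, f t) := by
  induction ks with
  | nil => cases h
  | cons k rest ih =>
    by_cases hk : k = t
    · subst hk; simp
    · have : t ∈ rest := by
        cases h with
        | head => exact absurd rfl hk
        | tail _ h' => exact h'
      have hbe : (k == t) = false := by simp [hk]
      simp only [List.map_cons, List.find?_cons, hbe]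
      exact ih this

-- updating a set with elements it already has changes nothing
theorem pvUpdateAbsorb (l : List String) : ∀ (s : PySem.Set String), (∀ x ∈ l, x ∈ s) →
    PySem.Set.update s l = s := by
  induction l with
  | nil => intro s _; rfl
  | cons x rest ih =>
    intro s h
    have hmem : x ∈ s := h x (List.mem_cons_self ..)
    have hx : PySem.Set.add s x = s := by
      simp [PySem.Set.add, PySem.Set.contains, hmem]
    show PySem.Set.update (PySem.Set.add s x) rest = s
    rw [hx]
    exact ih s (fun y hy => h y (by simp [hy]))

theorem pvUpdateNilOfList (l : List String) :
    PySem.Set.update ([] : PySem.Set String) l = PySem.Set.ofList l := by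
  rw [PySem.Set.ofList_eq_foldl]; rfl

-- ===== VERDICT (by name: the statement is the Claim_ definition above) =====
theorem index_ranked_rows_spec : Claim_equal_index_ranked_rows := by
  unfold Claim_equal_index_ranked_rows
  intro rows top_n _ _
  unfold Spec_index_ranked_rows index_ranked_rows
  -- the valid (term, row) pairs
  set V := (rows.map (fun r => (pvTermKey (pvRowGet r "term"), r))).filter (fun p => p.1 != "") with hV
  rw [pvFoldA rows PySem.Dict.empty]
  set byTerm := V.foldl (fun d p => d.modify p.1 [] (· ++ [p.2])) PySem.Dict.empty with hBT
  -- keys of the bucket dict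
  have hkeys : byTerm.keys = PySem.Set.ofList (V.map (·.1)) := by
    rw [hBT, PySem.Dict.keys_foldl_modify_key V (fun p => p.1) [] (fun _ p v => v ++ [p.2]),
      PySem.Dict.keys_empty, pvUpdateNilOfList]
  have hnodup : byTerm.keys.Nodup := by
    rw [hBT]
    exact PySem.Dict.nodup_keys_foldl_modify_key V (fun p => p.1) [] (fun _ p v => v ++ [p.2])
      PySem.Dict.empty PySem.Dict.nodup_keys_empty
  have hgetD : ∀ t, byTerm.getD t [] = ((V.filter (fun p => p.1 == t)).map (·.2)) := by
    intro t
    rw [hBT, PySem.Dict.getD_foldl_modify_append, PySem.Dict.getD_empty, List.nil_append]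
  -- A's second loop rewrites every bucket in place
  set g : String × List (List (String × String)) → List (List (String × String)) :=
    fun p => PySem.List.slice (PySem.List.sorted p.2 pvRank false) none (some top_n) with hg
  set final := byTerm.items.foldl (fun d p => d.insert p.1 (g p)) byTerm with hfin
  have hitems : byTerm.items = byTerm.keys.map (fun k => (k, byTerm.getD k [])) :=
    PySem.Dict.items_eq_map_keys byTerm hnodup []
  have hitemsKeys : byTerm.items.map (·.1) = byTerm.keys := rfl
  have hfkeys : final.keys = byTerm.keys := by
    rw [hfin, PySem.Dict.keys_foldl_insert_key byTerm.items (fun p => p.1) (fun _ p => g p),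
      hitemsKeys]
    exact pvUpdateAbsorb byTerm.keys byTerm.keys (fun x hx => hx)
  have hfnodup : final.keys.Nodup := by rw [hfkeys]; exact hnodup
  have hfgetD : ∀ t, t ∈ byTerm.keys → final.getD t [] = g (t, byTerm.getD t []) := by
    intro t ht
    rw [hfin, pvGetDFoldIns g byTerm.items (by rw [hitemsKeys]; exact hnodup) byTerm t]
    rw [hitems, pvFindMapKeys (fun k => byTerm.getD k []) byTerm.keys t ht]
  have hfitems : final.items = byTerm.keys.map (fun t => (t, g (t, byTerm.getD t []))) := by
    rw [PySem.Dict.items_eq_map_keys final hfnodup [], hfkeys]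
    exact List.map_congr_left (fun t ht => by rw [hfgetD t ht])
  -- B's key order is the same list of keys
  have horder : PySem.List.dedup (V.map (·.1)) = byTerm.keys := by
    rw [PySem.List.dedup_eq_ofList, hkeys]
  have halt : index_ranked_rows_alt rows top_n
      = (PySem.List.dedup (V.map (·.1))).map (fun t =>
          (t, PySem.List.slice
            (((PySem.List.sorted V (fun p => pvRank p.2) false).filter (fun p => p.1 == t)).map (·.2))
            none (some top_n))) := rfl
  rw [hfitems, halt, horder]
  -- pointwise: each bucket, sorted then sliced, is the filtered slice of the global sort
  apply List.map_congr_left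
  intro t _
  have hgt : g (t, byTerm.getD t [])
      = PySem.List.slice (PySem.List.sorted (byTerm.getD t []) pvRank false) none (some top_n) := rfl
  rw [hgt, hgetD t, ← pvMain t V]
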